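-- pv_equiv track=rewrite | github.com/artemk1337/neuro | networks/marketing_prj/prj_donate_2/un_sort_topics.py | params
-- ===== SOURCE A (Python) =====
-- def params(length):
--     x = []
--     y = []
--     count = 0
--     x_shift = 1000
--     y_shift = 1000
--     for i in range(length):
--         if count == 20:
--             count = 0
--             x_shift = 1000
--             y_shift += 1000
--         x.append(x_shift)
--         y.append(y_shift)
--         count += 1
--     return [x, y]
-- ===== SOURCE B (Python) =====
-- def params(length):
--     return [[1000] * length, [1000 * (1 + i // 20) for i in range(length)]]
-- ===== Notes on version B (the rewrite author's own statement) =====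
-- stated objective: simpler
-- what changed: Replaces the stateful loop maintaining count and the two shift variables (reset every block of 20) with direct construction: x is a constant-repeated list and y is a comprehension using the closed-form block index i//20.
import Mathlib
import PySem

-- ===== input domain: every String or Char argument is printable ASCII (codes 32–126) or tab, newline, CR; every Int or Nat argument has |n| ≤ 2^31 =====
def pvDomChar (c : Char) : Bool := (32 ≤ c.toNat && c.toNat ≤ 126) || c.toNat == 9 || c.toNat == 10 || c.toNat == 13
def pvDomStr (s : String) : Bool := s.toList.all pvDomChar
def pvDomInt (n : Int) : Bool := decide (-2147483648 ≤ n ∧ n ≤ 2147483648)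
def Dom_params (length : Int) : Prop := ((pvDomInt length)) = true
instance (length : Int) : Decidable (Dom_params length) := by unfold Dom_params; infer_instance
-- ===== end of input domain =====

-- B builds the two coordinate lists directly (constant x, closed-form block index for y)
-- instead of A's stateful loop with count/x_shift/y_shift reset every 20 (objective: simpler).


-- ===== PORT A =====
-- one loop iteration of A: state (x, y, count, x_shift, y_shift)
def stepA (st : List Int × List Int × Int × Int × Int) (_i : Int) :
    List Int × List Int × Int × Int × Int :=
  let (x, y, count, x_shift, y_shift) := st
  let (count, x_shift, y_shift) :=
    if count == 20 then ((0 : Int), (1000 : Int), y_shift + 1000)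
    else (count, x_shift, y_shift)
  (x ++ [x_shift], y ++ [y_shift], count + 1, x_shift, y_shift)

def params (length : Int) : List (List Int) :=
  let st := (PySem.List.pyRange 0 length 1).foldl stepA ([], [], 0, 1000, 1000)
  [st.1, st.2.1]

-- ===== PORT B =====
def params_alt (length : Int) : List (List Int) :=
  [List.replicate length.toNat 1000,
   (PySem.List.pyRange 0 length 1).map (fun i => 1000 * (1 + PySem.Int.floordiv i 20))]

-- ===== PRECONDITION & SPEC =====
def Spec_params (length : Int) (out : List (List Int)) : Prop := out = params_alt length
instance (length : Int) (out : List (List Int)) : Decidable (Spec_params length out) := by unfold Spec_params; infer_instance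

-- ===== CLAIM (what is proved, stated in full; the proofs are below) =====
def Claim_equal_params : Prop := ∀ (length : Int), Dom_params length → Spec_params length (params length)

-- ===== LEMMAS AND PROOFS =====

-- count after n iterations of A's loop
def cntN (n : Nat) : Nat := if n = 0 then 0 else (n - 1) % 20 + 1
-- y_shift after n iterations of A's loop
def yshN (n : Nat) : Nat := 1000 + 1000 * ((n - 1) / 20)

theorem loopA (n : Nat) :
    ((List.range n).map Int.ofNat).foldl stepA ([], [], 0, 1000, 1000)
    = (List.replicate n (1000 : Int),
       (List.range n).map (fun k => ((1000 * (1 + k / 20) : Nat) : Int)),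
       ((cntN n : Nat) : Int), 1000, ((yshN n : Nat) : Int)) := by
  induction n with
  | zero => simp [cntN, yshN]
  | succ n ih =>
      rw [List.range_succ, List.map_append, List.foldl_append, ih]
      simp only [List.map_cons, List.map_nil, List.foldl_cons, List.foldl_nil, stepA]
      rcases n with _ | m
      · norm_num [cntN, yshN]
      · simp only [cntN, yshN, Nat.succ_ne_zero, if_false, Nat.add_sub_cancel]
        by_cases h : m % 20 = 19
        · rw [h]
          norm_num [List.replicate_succ', Prod.ext_iff, List.range_succ]
          omega
        · have hc : ((m % 20 + 1 : Nat) : Int) ≠ 20 := by omega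
          simp only [beq_iff_eq, hc, if_false]
          norm_num [List.replicate_succ', Prod.ext_iff, List.range_succ]
          omega

theorem params_eq_alt (length : Int) : params length = params_alt length := by
  have h : PySem.List.pyRange 0 length 1 = (List.range length.toNat).map Int.ofNat := by
    simp [PySem.List.pyRange_one]
  unfold params params_alt
  rw [h, loopA]
  simp only [List.map_map, Function.comp_def,
    PySem.Int.floordiv_eq_ediv_of_pos (show (0:Int) < 20 by norm_num)]
  push_cast
  ring_nf
  simp [Int.ofNat_eq_natCast]

-- ===== VERDICT (by name: the statement is the Claim_ definition above) =====
theorem params_spec : Claim_equal_params := by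
  intro length _
  unfold Spec_params
  exact params_eq_alt length
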